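-- pv_equiv track=rewrite | github.com/munaAchyuta/practice | logic.py | get_index_ofinvvisualcues
-- ===== SOURCE A (Python) =====
-- def get_index_ofinvvisualcues(ds):
--     ds1 = len([item for sublist in ds for item in sublist]) #page_size
--     ds2 = [i for i in range(1,ds1+1)]
--     counter = 0
--     tmp_lst = []
--     for i in ds:
--         tmp_lst.append(ds2[counter:counter+len(i)])
--         counter += len(i)
--
--     return tmp_lst
-- ===== SOURCE B (Python) =====
-- def get_index_ofinvvisualcues(ds):
--     it = iter(range(1, sum(map(len, ds)) + 1))
--     return [[next(it) for _ in s] for s in ds]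
-- ===== Notes on version B (the rewrite author's own statement) =====
-- stated objective: alternative
-- what changed: B builds one lazy 1..n stream and consumes it element-by-element with next() inside a nested comprehension, replacing A's flatten pass, materialized index list and counter-plus-slice loop with stream consumption (no counter arithmetic, no slicing).
import Mathlib
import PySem

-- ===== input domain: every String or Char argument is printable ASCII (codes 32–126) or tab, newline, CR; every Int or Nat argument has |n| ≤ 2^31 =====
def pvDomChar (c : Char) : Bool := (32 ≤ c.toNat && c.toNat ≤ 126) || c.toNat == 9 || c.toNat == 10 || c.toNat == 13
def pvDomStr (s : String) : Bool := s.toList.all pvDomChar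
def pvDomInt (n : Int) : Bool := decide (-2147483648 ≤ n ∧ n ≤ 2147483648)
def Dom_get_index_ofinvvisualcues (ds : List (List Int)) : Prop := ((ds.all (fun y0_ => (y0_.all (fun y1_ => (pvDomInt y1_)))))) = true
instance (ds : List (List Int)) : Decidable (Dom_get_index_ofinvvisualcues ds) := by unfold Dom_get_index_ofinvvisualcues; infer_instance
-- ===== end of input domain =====

-- B replaces A's flatten-then-counter-slice loop by consuming a single lazy 1..n stream element-by-element (objective: alternative).

-- ===== PORT A =====
def get_index_ofinvvisualcues (ds : List (List Int)) : List (List Int) :=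
  let ds1 : Int := (ds.flatMap (fun sublist => sublist)).length
  let ds2 : List Int := PySem.List.pyRange 1 (ds1 + 1) 1
  let st := ds.foldl
    (fun (st : Int × List (List Int)) (i : List Int) =>
      (st.1 + (i.length : Int),
       st.2 ++ [PySem.List.slice ds2 (some st.1) (some (st.1 + (i.length : Int)))]))
    (0, [])
  st.2

-- ===== PORT B =====
-- B: the iterator is modelled as the list of not-yet-consumed stream elements; next() pops its head
-- (the empty case is Python's StopIteration, unreachable because the stream holds exactly enough elements).
def get_index_ofinvvisualcues_alt (ds : List (List Int)) : List (List Int) :=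
  let total : Int := (ds.map (fun s => (s.length : Int))).sum
  let it0 : List Int := PySem.List.pyRange 1 (total + 1) 1
  (ds.foldl
    (fun (st : List Int × List (List Int)) (s : List Int) =>
      let inner := s.foldl
        (fun (st2 : List Int × List Int) (_ : Int) =>
          match st2.1 with
          | [] => st2
          | x :: rest => (rest, st2.2 ++ [x]))
        (st.1, [])
      (inner.1, st.2 ++ [inner.2]))
    (it0, [])).2

-- ===== PRECONDITION & SPEC =====
def Spec_get_index_ofinvvisualcues (ds : List (List Int)) (out : List (List Int)) : Prop := out = get_index_ofinvvisualcues_alt ds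
instance (ds : List (List Int)) (out : List (List Int)) : Decidable (Spec_get_index_ofinvvisualcues ds out) := by unfold Spec_get_index_ofinvvisualcues; infer_instance

-- ===== CLAIM (what is proved, stated in full; the proofs are below) =====
def Claim_equal_get_index_ofinvvisualcues : Prop := ∀ (ds : List (List Int)), Dom_get_index_ofinvvisualcues ds → Spec_get_index_ofinvvisualcues ds (get_index_ofinvvisualcues ds)

-- ===== LEMMAS AND PROOFS =====
-- the common shape: consecutive chunks of 1-based indices starting after offset c
def chunksFrom (c : Int) : List (List Int) → List (List Int)
  | [] => []
  | s :: r => PySem.List.pyRange (c + 1) (c + (s.length : Int) + 1) 1 :: chunksFrom (c + (s.length : Int)) r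

def sumLens (ds : List (List Int)) : Nat := (ds.map List.length).sum

lemma slice_pyRange_chunk (c k n : Nat) (h : c + k ≤ n) :
    PySem.List.slice (PySem.List.pyRange 1 ((n : Int) + 1) 1) (some (c : Int)) (some ((c : Int) + (k : Int)))
      = PySem.List.pyRange ((c : Int) + 1) ((c : Int) + (k : Int) + 1) 1 := by
  rw [PySem.List.slice_natCast_add]
  rw [PySem.List.pyRange_one_append 1 ((c : Int) + 1) ((n : Int) + 1) (by omega) (by omega)]
  rw [List.drop_append_of_le_length (by simp only [PySem.List.length_pyRange_one]; omega)]
  rw [List.drop_of_length_le (by simp only [PySem.List.length_pyRange_one]; omega)]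
  rw [PySem.List.pyRange_one_append ((c : Int) + 1) ((c : Int) + (k : Int) + 1) ((n : Int) + 1) (by omega) (by omega)]
  rw [List.nil_append, List.take_append_of_le_length (by simp only [PySem.List.length_pyRange_one]; omega)]
  rw [List.take_of_length_le (by simp only [PySem.List.length_pyRange_one]; omega)]

lemma foldA (n : Nat) :
    ∀ (rest : List (List Int)) (c : Nat) (acc : List (List Int)), c + sumLens rest ≤ n →
    (rest.foldl
      (fun (st : Int × List (List Int)) (i : List Int) =>
        (st.1 + (i.length : Int),
         st.2 ++ [PySem.List.slice (PySem.List.pyRange 1 ((n : Int) + 1) 1) (some st.1) (some (st.1 + (i.length : Int)))]))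
      ((c : Int), acc)).2 = acc ++ chunksFrom (c : Int) rest := by
  intro rest
  induction rest with
  | nil => intro c acc _; simp only [List.foldl_nil, chunksFrom, List.append_nil]
  | cons s r ih =>
    intro c acc h
    simp only [List.foldl_cons]
    have hsum : sumLens (s :: r) = s.length + sumLens r := by simp [sumLens]
    have h1 : ((c : Int) + (s.length : Int)) = ((c + s.length : Nat) : Int) := by push_cast; ring
    rw [slice_pyRange_chunk c s.length n (by omega), h1]
    rw [ih (c + s.length) _ (by omega)]
    rw [List.append_assoc, ← h1]
    rfl

-- consuming len(s) elements of the stream pyRange (c+1) (n+1) 1 yields that prefix and the rest of the stream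
lemma innerFold (n : Nat) :
    ∀ (s : List Int) (c : Nat) (acc : List Int), c + s.length ≤ n →
    (s.foldl
      (fun (st2 : List Int × List Int) (_ : Int) =>
        match st2.1 with
        | [] => st2
        | x :: rest => (rest, st2.2 ++ [x]))
      (PySem.List.pyRange ((c : Int) + 1) ((n : Int) + 1) 1, acc))
    = (PySem.List.pyRange ((c : Int) + (s.length : Int) + 1) ((n : Int) + 1) 1,
       acc ++ PySem.List.pyRange ((c : Int) + 1) ((c : Int) + (s.length : Int) + 1) 1) := by
  intro s
  induction s with
  | nil =>
    intro c acc _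
    simp only [List.foldl_nil, List.length_nil, Nat.cast_zero, add_zero]
    rw [PySem.List.pyRange_one_eq_nil (le_refl ((c : Int) + 1)), List.append_nil]
  | cons x0 t ih =>
    intro c acc h
    simp only [List.foldl_cons, List.length_cons]
    rw [PySem.List.pyRange_one_cons (by simp only [List.length_cons] at h; omega : (c : Int) + 1 < (n : Int) + 1)]
    have h1 : ((c : Int) + 1 + 1) = (((c + 1 : Nat) : Int) + 1) := by push_cast; ring
    have h2 := ih (c + 1) (acc ++ [(c : Int) + 1]) (by simp only [List.length_cons] at h; omega)
    rw [h1]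
    simp only [h2]
    have h3 : (((c + 1 : Nat) : Int) + (t.length : Int) + 1) = ((c : Int) + ((t.length : Int) + 1) + 1) := by
      push_cast; ring
    rw [h3, List.append_assoc]
    congr 1
    push_cast
    rw [List.singleton_append, ← PySem.List.pyRange_one_cons
      (show ((c : Int) + 1) < (c : Int) + ((t.length : Int) + 1) + 1 by omega)]

lemma foldB (n : Nat) :
    ∀ (rest : List (List Int)) (c : Nat) (acc : List (List Int)), c + sumLens rest ≤ n →
    (rest.foldl
      (fun (st : List Int × List (List Int)) (s : List Int) =>
        let inner := s.foldl
          (fun (st2 : List Int × List Int) (_ : Int) =>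
            match st2.1 with
            | [] => st2
            | x :: rest => (rest, st2.2 ++ [x]))
          (st.1, [])
        (inner.1, st.2 ++ [inner.2]))
      (PySem.List.pyRange ((c : Int) + 1) ((n : Int) + 1) 1, acc)).2
    = acc ++ chunksFrom (c : Int) rest := by
  intro rest
  induction rest with
  | nil => intro c acc _; simp only [List.foldl_nil, chunksFrom, List.append_nil]
  | cons s r ih =>
    intro c acc h
    have hsum : sumLens (s :: r) = s.length + sumLens r := by simp [sumLens]
    simp only [List.foldl_cons]
    rw [innerFold n s c [] (by omega)]
    simp only [List.nil_append]
    have h1 : ((c : Int) + (s.length : Int)) = ((c + s.length : Nat) : Int) := by push_cast; ring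
    rw [h1]
    rw [ih (c + s.length) _ (by omega)]
    rw [List.append_assoc, ← h1]
    rfl

lemma flatMap_len (ds : List (List Int)) : (ds.flatMap (fun sublist => sublist)).length = sumLens ds := by
  simp [sumLens]

lemma total_eq (ds : List (List Int)) : (ds.map (fun s => (s.length : Int))).sum = (sumLens ds : Int) := by
  induction ds with
  | nil => simp [sumLens]
  | cons s r ih =>
    simp only [sumLens, List.map_cons, List.sum_cons] at ih ⊢
    rw [ih]; push_cast; ring

-- ===== VERDICT (by name: the statement is the Claim_ definition above) =====
theorem get_index_ofinvvisualcues_spec : Claim_equal_get_index_ofinvvisualcues := by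
  intro ds _
  show get_index_ofinvvisualcues ds = get_index_ofinvvisualcues_alt ds
  unfold get_index_ofinvvisualcues get_index_ofinvvisualcues_alt
  have hA := foldA (sumLens ds) ds 0 [] (by omega)
  have hB := foldB (sumLens ds) ds 0 [] (by omega)
  simp only [List.nil_append, Nat.cast_zero, zero_add] at hA hB
  simp only [flatMap_len, total_eq]
  rw [hA, hB]
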